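-- pv_equiv track=rewrite | github.com/brianlagranda/Pygame-Project1 | TPencolumnadas/funcionesVACIAS.py | esValida
-- ===== SOURCE A (Python) =====
-- def esValida(lista, candidata, candidatas, listaIzq, listaMedio, listaDerecha):
--     if candidata in lista and candidata not in candidatas:
--         contizq=0
--         contmed=0
--         contder=0
--         for letra in candidata:
--             if letra in listaIzq and contmed==0 and contder==0:
--                 contizq=contizq+1
--             elif letra in listaMedio and contder==0:
--                 contmed=contmed+1
--             elif letra in listaDerecha:
--                 contder=contder+1
--         cont=contder+contmed+contizq
--
--         if cont==len(candidata):
--             return True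
--     return False
-- ===== SOURCE B (Python) =====
-- def esValida(lista, candidata, candidatas, listaIzq, listaMedio, listaDerecha):
--     if candidata in lista and candidata not in candidatas:
--         i = 0
--         n = len(candidata)
--         while i < n and candidata[i] in listaIzq:
--             i += 1
--         while i < n and candidata[i] in listaMedio:
--             i += 1
--         while i < n and candidata[i] in listaDerecha:
--             i += 1
--         return i == n
--     return False
-- ===== Notes on version B (the rewrite author's own statement) =====
-- stated objective: simpler
-- what changed: Replaced A's single pass with three phase counters and a final sum-vs-length comparison by three sequential index-advancing while loops (izq, then medio, then derecha) that succeed iff the whole word is consumed.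
import Mathlib
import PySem

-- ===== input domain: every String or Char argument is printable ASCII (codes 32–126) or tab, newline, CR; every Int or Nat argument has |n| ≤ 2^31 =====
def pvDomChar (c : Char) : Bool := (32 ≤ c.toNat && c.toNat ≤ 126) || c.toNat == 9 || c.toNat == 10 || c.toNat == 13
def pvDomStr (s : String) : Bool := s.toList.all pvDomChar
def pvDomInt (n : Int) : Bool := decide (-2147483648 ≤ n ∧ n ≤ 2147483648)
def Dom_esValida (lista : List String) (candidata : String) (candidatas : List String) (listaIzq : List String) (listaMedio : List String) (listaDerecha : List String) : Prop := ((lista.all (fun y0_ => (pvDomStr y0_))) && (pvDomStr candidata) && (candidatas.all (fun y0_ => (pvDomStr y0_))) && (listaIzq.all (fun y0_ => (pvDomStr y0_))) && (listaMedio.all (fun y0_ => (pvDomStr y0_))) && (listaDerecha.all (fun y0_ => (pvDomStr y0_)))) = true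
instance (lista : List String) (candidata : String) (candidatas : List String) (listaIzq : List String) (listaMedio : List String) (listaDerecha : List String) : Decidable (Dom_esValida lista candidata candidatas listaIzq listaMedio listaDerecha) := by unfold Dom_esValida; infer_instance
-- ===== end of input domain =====

-- B replaces A's three phase counters + final sum check by three sequential consume loops: simpler decomposition, same cost.

-- ===== PORT A =====
-- step of A's for-loop: state (contizq, contmed, contder)
def esValidaStep (listaIzq listaMedio listaDerecha : List String) (st : Int × Int × Int) (letra : Char) : Int × Int × Int :=
  if listaIzq.contains (String.singleton letra) && st.2.1 == 0 && st.2.2 == 0 then (st.1 + 1, st.2.1, st.2.2)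
  else if listaMedio.contains (String.singleton letra) && st.2.2 == 0 then (st.1, st.2.1 + 1, st.2.2)
  else if listaDerecha.contains (String.singleton letra) then (st.1, st.2.1, st.2.2 + 1)
  else st

def esValida (lista : List String) (candidata : String) (candidatas : List String) (listaIzq : List String) (listaMedio : List String) (listaDerecha : List String) : Bool :=
  if lista.contains candidata && !(candidatas.contains candidata) then
    let st := candidata.toList.foldl (esValidaStep listaIzq listaMedio listaDerecha) (0, 0, 0)
    let cont := st.2.2 + st.2.1 + st.1
    if cont == (candidata.toList.length : Int) then true else false
  else false

-- ===== PORT B =====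
-- one of B's while-loops: advance past letters belonging to the current list
def consume (p : List String) : List Char → List Char
  | [] => []
  | c :: cs => if p.contains (String.singleton c) then consume p cs else c :: cs

def esValida_alt (lista : List String) (candidata : String) (candidatas : List String) (listaIzq : List String) (listaMedio : List String) (listaDerecha : List String) : Bool :=
  if lista.contains candidata && !(candidatas.contains candidata) then
    (consume listaDerecha (consume listaMedio (consume listaIzq candidata.toList))).isEmpty
  else false

-- ===== PRECONDITION & SPEC =====
def Spec_esValida (lista : List String) (candidata : String) (candidatas : List String) (listaIzq : List String) (listaMedio : List String) (listaDerecha : List String) (out : Bool) : Prop := out = esValida_alt lista candidata candidatas listaIzq listaMedio listaDerecha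
instance (lista : List String) (candidata : String) (candidatas : List String) (listaIzq : List String) (listaMedio : List String) (listaDerecha : List String) (out : Bool) : Decidable (Spec_esValida lista candidata candidatas listaIzq listaMedio listaDerecha out) := by unfold Spec_esValida; infer_instance

-- ===== CLAIM (what is proved, stated in full; the proofs are below) =====
def Claim_equal_esValida : Prop := ∀ (lista : List String) (candidata : String) (candidatas : List String) (listaIzq : List String) (listaMedio : List String) (listaDerecha : List String), Dom_esValida lista candidata candidatas listaIzq listaMedio listaDerecha → Spec_esValida lista candidata candidatas listaIzq listaMedio listaDerecha (esValida lista candidata candidatas listaIzq listaMedio listaDerecha)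

-- ===== LEMMAS AND PROOFS =====

-- proof-only abbreviation: the sum contder+contmed+contizq of a state
def pvTotal (st : Int × Int × Int) : Int := st.2.2 + st.2.1 + st.1

-- the fold's total grows by at most the number of letters
theorem total_foldl_le (listaIzq listaMedio listaDerecha : List String) :
    ∀ (cs : List Char) (st : Int × Int × Int),
      pvTotal (cs.foldl (esValidaStep listaIzq listaMedio listaDerecha) st) ≤ pvTotal st + cs.length := by
  intro cs
  induction cs with
  | nil => intro st; simp
  | cons c cs ih =>
    intro st
    rw [List.foldl_cons]
    have h := ih (esValidaStep listaIzq listaMedio listaDerecha st c)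
    have h2 : pvTotal (esValidaStep listaIzq listaMedio listaDerecha st c) ≤ pvTotal st + 1 := by
      simp only [esValidaStep, pvTotal]
      split_ifs <;> simp <;> omega
    simp only [List.length_cons]
    push_cast
    omega

-- phase 2 (contder > 0): the remaining letters all get counted iff consume listaDerecha empties them
theorem phase2 (listaIzq listaMedio listaDerecha : List String) :
    ∀ (cs : List Char) (ci cm cd : Int), 0 < cd →
      (pvTotal (cs.foldl (esValidaStep listaIzq listaMedio listaDerecha) (ci, cm, cd)) = ci + cm + cd + cs.length ↔
       consume listaDerecha cs = []) := by
  intro cs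
  induction cs with
  | nil => intro ci cm cd hcd; simp [consume, pvTotal]; try omega
  | cons c cs ih =>
    intro ci cm cd hcd
    have hcd' : (cd == 0) = false := by simp; omega
    by_cases hd : String.singleton c ∈ listaDerecha
    · have hstep : esValidaStep listaIzq listaMedio listaDerecha (ci, cm, cd) c = (ci, cm, cd + 1) := by
        simp [esValidaStep, hcd', hd]
      rw [show consume listaDerecha (c :: cs) = consume listaDerecha cs from by simp [consume, hd]]
      simp only [List.foldl_cons, hstep, List.length_cons]
      rw [← ih ci cm (cd + 1) (by omega)]
      constructor <;> intro h <;> push_cast at h ⊢ <;> omega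
    · have hstep : esValidaStep listaIzq listaMedio listaDerecha (ci, cm, cd) c = (ci, cm, cd) := by
        simp [esValidaStep, hcd', hd]
      rw [show consume listaDerecha (c :: cs) = c :: cs from by simp [consume, hd]]
      simp only [List.foldl_cons, hstep, List.length_cons]
      have hb := total_foldl_le listaIzq listaMedio listaDerecha cs (ci, cm, cd)
      simp only [pvTotal] at hb ⊢
      constructor
      · intro h; exfalso; push_cast at h hb; omega
      · intro h; simp at h

-- phase 1 (contmed > 0, contder = 0)
theorem phase1 (listaIzq listaMedio listaDerecha : List String) :
    ∀ (cs : List Char) (ci cm : Int), 0 < cm →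
      (pvTotal (cs.foldl (esValidaStep listaIzq listaMedio listaDerecha) (ci, cm, 0)) = ci + cm + cs.length ↔
       consume listaDerecha (consume listaMedio cs) = []) := by
  intro cs
  induction cs with
  | nil => intro ci cm hcm; simp [consume, pvTotal]; try omega
  | cons c cs ih =>
    intro ci cm hcm
    have hcm' : (cm == 0) = false := by simp; omega
    by_cases hm : String.singleton c ∈ listaMedio
    · have hstep : esValidaStep listaIzq listaMedio listaDerecha (ci, cm, 0) c = (ci, cm + 1, 0) := by
        simp [esValidaStep, hcm', hm]
      rw [show consume listaMedio (c :: cs) = consume listaMedio cs from by simp [consume, hm]]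
      simp only [List.foldl_cons, hstep, List.length_cons]
      rw [← ih ci (cm + 1) (by omega)]
      constructor <;> intro h <;> push_cast at h ⊢ <;> omega
    · rw [show consume listaMedio (c :: cs) = c :: cs from by simp [consume, hm]]
      by_cases hd : String.singleton c ∈ listaDerecha
      · have hstep : esValidaStep listaIzq listaMedio listaDerecha (ci, cm, 0) c = (ci, cm, 1) := by
          simp [esValidaStep, hcm', hm, hd]
        rw [show consume listaDerecha (c :: cs) = consume listaDerecha cs from by simp [consume, hd]]
        simp only [List.foldl_cons, hstep, List.length_cons]
        rw [← phase2 listaIzq listaMedio listaDerecha cs ci cm 1 (by omega)]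
        constructor <;> intro h <;> push_cast at h ⊢ <;> omega
      · have hstep : esValidaStep listaIzq listaMedio listaDerecha (ci, cm, 0) c = (ci, cm, 0) := by
          simp [esValidaStep, hcm', hm, hd]
        rw [show consume listaDerecha (c :: cs) = c :: cs from by simp [consume, hd]]
        simp only [List.foldl_cons, hstep, List.length_cons]
        have hb := total_foldl_le listaIzq listaMedio listaDerecha cs (ci, cm, 0)
        simp only [pvTotal] at hb ⊢
        constructor
        · intro h; exfalso; push_cast at h hb; omega
        · intro h; simp at h

-- phase 0 (both counters still zero)
theorem phase0 (listaIzq listaMedio listaDerecha : List String) :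
    ∀ (cs : List Char) (ci : Int),
      (pvTotal (cs.foldl (esValidaStep listaIzq listaMedio listaDerecha) (ci, 0, 0)) = ci + cs.length ↔
       consume listaDerecha (consume listaMedio (consume listaIzq cs)) = []) := by
  intro cs
  induction cs with
  | nil => intro ci; simp [consume, pvTotal]; try omega
  | cons c cs ih =>
    intro ci
    by_cases hi : String.singleton c ∈ listaIzq
    · have hstep : esValidaStep listaIzq listaMedio listaDerecha (ci, 0, 0) c = (ci + 1, 0, 0) := by
        simp [esValidaStep, hi]
      rw [show consume listaIzq (c :: cs) = consume listaIzq cs from by simp [consume, hi]]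
      simp only [List.foldl_cons, hstep, List.length_cons]
      rw [← ih (ci + 1)]
      constructor <;> intro h <;> push_cast at h ⊢ <;> omega
    · rw [show consume listaIzq (c :: cs) = c :: cs from by simp [consume, hi]]
      by_cases hm : String.singleton c ∈ listaMedio
      · have hstep : esValidaStep listaIzq listaMedio listaDerecha (ci, 0, 0) c = (ci, 1, 0) := by
          simp [esValidaStep, hi, hm]
        rw [show consume listaMedio (c :: cs) = consume listaMedio cs from by simp [consume, hm]]
        simp only [List.foldl_cons, hstep, List.length_cons]
        rw [← phase1 listaIzq listaMedio listaDerecha cs ci 1 (by omega)]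
        constructor <;> intro h <;> push_cast at h ⊢ <;> omega
      · rw [show consume listaMedio (c :: cs) = c :: cs from by simp [consume, hm]]
        by_cases hd : String.singleton c ∈ listaDerecha
        · have hstep : esValidaStep listaIzq listaMedio listaDerecha (ci, 0, 0) c = (ci, 0, 1) := by
            simp [esValidaStep, hi, hm, hd]
          rw [show consume listaDerecha (c :: cs) = consume listaDerecha cs from by simp [consume, hd]]
          simp only [List.foldl_cons, hstep, List.length_cons]
          rw [← phase2 listaIzq listaMedio listaDerecha cs ci 0 1 (by omega)]
          constructor <;> intro h <;> push_cast at h ⊢ <;> omega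
        · have hstep : esValidaStep listaIzq listaMedio listaDerecha (ci, 0, 0) c = (ci, 0, 0) := by
            simp [esValidaStep, hi, hm, hd]
          rw [show consume listaDerecha (c :: cs) = c :: cs from by simp [consume, hd]]
          simp only [List.foldl_cons, hstep, List.length_cons]
          have hb := total_foldl_le listaIzq listaMedio listaDerecha cs (ci, 0, 0)
          simp only [pvTotal] at hb ⊢
          constructor
          · intro h; exfalso; push_cast at h hb; omega
          · intro h; simp at h

-- ===== VERDICT (by name: the statement is the Claim_ definition above) =====
theorem esValida_spec : Claim_equal_esValida := by
  intro lista candidata candidatas listaIzq listaMedio listaDerecha _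
  unfold Spec_esValida esValida esValida_alt
  by_cases hg : (lista.contains candidata && !(candidatas.contains candidata)) = true
  · rw [if_pos hg, if_pos hg]
    have h := phase0 listaIzq listaMedio listaDerecha candidata.toList 0
    simp only [pvTotal, zero_add] at h
    by_cases hc : consume listaDerecha (consume listaMedio (consume listaIzq candidata.toList)) = []
    · rw [hc]
      rw [if_pos (beq_iff_eq.mpr (h.mpr hc))]
      rfl
    · rw [show (consume listaDerecha (consume listaMedio (consume listaIzq candidata.toList))).isEmpty = false from by
        simpa [List.isEmpty_iff] using hc]
      rw [if_neg]
      intro he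
      exact hc (h.mp (beq_iff_eq.mp he))
  · rw [if_neg hg, if_neg hg]
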